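-- pv_equiv track=rewrite | github.com/skalej/dpa-guard-cx | backend/app/api/reviews.py | _extract_section_sentence
-- ===== SOURCE A (Python) =====
-- def _extract_section_sentence(section_text: str, local_start: int, local_end: int) -> str:
--     if not section_text:
--         return ""
--     local_start = max(0, min(local_start, len(section_text)))
--     local_end = max(0, min(local_end, len(section_text)))
--     left = max(
--         section_text.rfind(".", 0, local_start),
--         section_text.rfind("!", 0, local_start),
--         section_text.rfind("?", 0, local_start),
--     )
--     right_candidates = [
--         section_text.find(".", local_end),
--         section_text.find("!", local_end),
--         section_text.find("?", local_end),
--     ]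
--     right_candidates = [idx for idx in right_candidates if idx != -1]
--     if left != -1 and right_candidates:
--         sentence_start = left + 1
--         sentence_end = min(right_candidates) + 1
--         return section_text[sentence_start:sentence_end].strip()
--
--     line_start = section_text.rfind("\n", 0, local_start)
--     line_end = section_text.find("\n", local_end)
--     if line_start == -1:
--         line_start = 0
--     else:
--         line_start += 1
--     if line_end == -1:
--         line_end = len(section_text)
--     return section_text[line_start:line_end].strip()
-- ===== SOURCE B (Python) =====
-- def _extract_section_sentence(section_text: str, local_start: int, local_end: int) -> str:
--     if not section_text:
--         return ""
--     n = len(section_text)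
--     ls = max(0, min(local_start, n))
--     le = max(0, min(local_end, n))
--     # One fused pass with four accumulators instead of six directional
--     # find/rfind scans plus max/min selection: for both the sentence
--     # delimiters and the newline fallback we track, in the same loop, the
--     # cut position just after the last delimiter strictly before ls and
--     # the cut just after the first delimiter at/after le.
--     sent_begin = sent_end = line_begin = line_end = None
--     for i, ch in enumerate(section_text):
--         if ch in ".!?":
--             if i < ls:
--                 sent_begin = i + 1
--             if i >= le and sent_end is None:
--                 sent_end = i + 1
--         elif ch == "\n":
--             if i < ls:
--                 line_begin = i + 1
--             if i >= le and line_end is None: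
--                 line_end = i + 1
--     if sent_begin is not None and sent_end is not None:
--         return section_text[sent_begin:sent_end].strip()
--     lb = 0 if line_begin is None else line_begin
--     lnd = n if line_end is None else line_end - 1
--     return section_text[lb:lnd].strip()
-- ===== Notes on version B (the rewrite author's own statement) =====
-- stated objective: alternative
-- what changed: Replaces the six directional rfind/find scans plus max/min selection (and the separate newline rfind/find fallback) with a single fused left-to-right pass that maintains four accumulators: the cut after the last sentence delimiter before the span, the cut after the first one at/after it, and the same pair for newlines.
import Mathlib
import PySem

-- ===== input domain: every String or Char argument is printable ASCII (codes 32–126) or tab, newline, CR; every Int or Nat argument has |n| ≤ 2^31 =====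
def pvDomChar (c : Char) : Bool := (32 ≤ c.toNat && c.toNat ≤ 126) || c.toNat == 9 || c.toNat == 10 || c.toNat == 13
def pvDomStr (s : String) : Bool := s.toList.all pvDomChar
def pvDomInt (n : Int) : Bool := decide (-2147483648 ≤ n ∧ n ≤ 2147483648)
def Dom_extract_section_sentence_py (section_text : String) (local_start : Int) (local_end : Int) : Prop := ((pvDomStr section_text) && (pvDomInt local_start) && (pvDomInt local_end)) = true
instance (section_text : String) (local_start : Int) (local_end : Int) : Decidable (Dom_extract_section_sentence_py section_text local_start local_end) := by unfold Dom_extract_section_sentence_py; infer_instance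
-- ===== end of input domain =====

-- B replaces A's six directional rfind/find scans plus max/min selection (and the separate
-- newline fallback scans) with ONE fused left-to-right pass maintaining four accumulators
-- (last sentence-cut before the span, first sentence-cut at/after it, and the same pair
-- for newlines); same cost, different decomposition.

-- ===== PORT A =====
def extract_section_sentence_py (section_text : String) (local_start : Int) (local_end : Int) : String :=
  if section_text = "" then "" else
  let n : Int := PySem.Str.len section_text
  let ls : Int := max 0 (min local_start n)
  let le : Int := max 0 (min local_end n)
  let left : Int := max (max (PySem.Str.rfindFrom section_text "." 0 (some ls))
                             (PySem.Str.rfindFrom section_text "!" 0 (some ls)))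
                        (PySem.Str.rfindFrom section_text "?" 0 (some ls))
  let right_candidates : List Int :=
    [PySem.Str.findFrom section_text "." le none,
     PySem.Str.findFrom section_text "!" le none,
     PySem.Str.findFrom section_text "?" le none]
  let right_candidates := right_candidates.filter (fun idx => idx ≠ -1)
  if left ≠ -1 ∧ right_candidates ≠ [] then
    let sentence_start := left + 1
    let sentence_end := ((PySem.List.min? right_candidates (fun y => y)).getD 0) + 1
    PySem.Str.strip (PySem.Str.slice section_text (some sentence_start) (some sentence_end))
  else
    let line_start := PySem.Str.rfindFrom section_text "\n" 0 (some ls)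
    let line_end := PySem.Str.findFrom section_text "\n" le none
    let line_start := if line_start = -1 then 0 else line_start + 1
    let line_end := if line_end = -1 then n else line_end
    PySem.Str.strip (PySem.Str.slice section_text (some line_start) (some line_end))

-- ===== PORT B =====
def pvP (a : Char) : Bool := a == '.' || a == '!' || a == '?'

structure PvSt where
  sb : Option Int
  se : Option Int
  lb : Option Int
  ln : Option Int
deriving Repr, DecidableEq

def pvStep (ls le : Int) (st : PvSt) (ic : Int × Char) : PvSt :=
  if pvP ic.2 then
    { st with
      sb := if ic.1 < ls then some (ic.1 + 1) else st.sb,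
      se := if le ≤ ic.1 ∧ st.se = none then some (ic.1 + 1) else st.se }
  else if ic.2 = '\n' then
    { st with
      lb := if ic.1 < ls then some (ic.1 + 1) else st.lb,
      ln := if le ≤ ic.1 ∧ st.ln = none then some (ic.1 + 1) else st.ln }
  else st

-- newline fallback of B (the tail of Source B's function)
def pvFb (t : String) (n : Int) (lb ln : Option Int) : String :=
  let lb' : Int := match lb with | none => 0 | some v => v
  let ln' : Int := match ln with | none => n | some v => v - 1
  PySem.Str.strip (PySem.Str.slice t (some lb') (some ln'))

-- final selection of B (the two returns of Source B's function)
def pvWrap (t : String) (n : Int) (sb se lb ln : Option Int) : String :=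
  match sb, se with
  | some b, some e => PySem.Str.strip (PySem.Str.slice t (some b) (some e))
  | _, _ => pvFb t n lb ln

def extract_section_sentence_py_alt (section_text : String) (local_start : Int) (local_end : Int) : String :=
  if section_text = "" then "" else
  let n : Int := PySem.Str.len section_text
  let ls : Int := max 0 (min local_start n)
  let le : Int := max 0 (min local_end n)
  let fin : PvSt := (PySem.List.enumerate section_text.toList).foldl (pvStep ls le) ⟨none, none, none, none⟩
  pvWrap section_text n fin.sb fin.se fin.lb fin.ln

-- ===== PRECONDITION & SPEC =====
def Spec_extract_section_sentence_py (section_text : String) (local_start : Int) (local_end : Int) (out : String) : Prop := out = extract_section_sentence_py_alt section_text local_start local_end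
instance (section_text : String) (local_start : Int) (local_end : Int) (out : String) : Decidable (Spec_extract_section_sentence_py section_text local_start local_end out) := by unfold Spec_extract_section_sentence_py; infer_instance

-- ===== CLAIM (what is proved, stated in full; the proofs are below) =====
def Claim_equal_extract_section_sentence_py : Prop := ∀ (section_text : String) (local_start : Int) (local_end : Int), Dom_extract_section_sentence_py section_text local_start local_end → Spec_extract_section_sentence_py section_text local_start local_end (extract_section_sentence_py section_text local_start local_end)

-- ===== LEMMAS AND PROOFS =====

def pvNl (a : Char) : Bool := a == '\n'

def pvFirstHit (cs : List Char) (p : Char → Bool) : Int :=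
  match cs with
  | [] => -1
  | a :: tl => if p a then 0 else (if pvFirstHit tl p = -1 then -1 else pvFirstHit tl p + 1)

def pvLastHit (cs : List Char) (p : Char → Bool) : Int :=
  match cs with
  | [] => -1
  | a :: tl =>
    if pvLastHit tl p = -1 then (if p a then 0 else -1) else pvLastHit tl p + 1

def pvHit (cs : List Char) (p : Char → Bool) (i : Nat) : Prop := ∃ a, cs[i]? = some a ∧ p a = true

def pvMaxSpec (h : Nat → Prop) (r : Int) : Prop :=
  (r = -1 ∧ ∀ i, ¬ h i) ∨ (∃ m : Nat, r = m ∧ h m ∧ ∀ i, h i → i ≤ m)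

def pvMinSpec (h : Nat → Prop) (r : Int) : Prop :=
  (r = -1 ∧ ∀ i, ¬ h i) ∨ (∃ m : Nat, r = m ∧ h m ∧ ∀ i, h i → m ≤ i)

theorem pvMaxSpec_unique {h : Nat → Prop} {r s : Int} (hr : pvMaxSpec h r) (hs : pvMaxSpec h s) : r = s := by
  rcases hr with ⟨e, hn⟩ | ⟨m, e, hm, hmax⟩ <;> rcases hs with ⟨e', hn'⟩ | ⟨m', e', hm', hmax'⟩
  · omega
  · exact absurd hm' (hn _)
  · exact absurd hm (hn' _)
  · have := hmax _ hm'; have := hmax' _ hm; omega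

theorem pvMinSpec_unique {h : Nat → Prop} {r s : Int} (hr : pvMinSpec h r) (hs : pvMinSpec h s) : r = s := by
  rcases hr with ⟨e, hn⟩ | ⟨m, e, hm, hmin⟩ <;> rcases hs with ⟨e', hn'⟩ | ⟨m', e', hm', hmin'⟩
  · omega
  · exact absurd hm' (hn _)
  · exact absurd hm (hn' _)
  · have := hmin _ hm'; have := hmin' _ hm; omega

theorem pvMaxSpec_congr {h h' : Nat → Prop} (hh : ∀ i, h i ↔ h' i) {r : Int} (hr : pvMaxSpec h r) : pvMaxSpec h' r := by
  rcases hr with ⟨e, hn⟩ | ⟨m, e, hm, hmax⟩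
  · exact Or.inl ⟨e, fun i hi => hn i ((hh i).2 hi)⟩
  · exact Or.inr ⟨m, e, (hh m).1 hm, fun i hi => hmax i ((hh i).2 hi)⟩

theorem pvMinSpec_congr {h h' : Nat → Prop} (hh : ∀ i, h i ↔ h' i) {r : Int} (hr : pvMinSpec h r) : pvMinSpec h' r := by
  rcases hr with ⟨e, hn⟩ | ⟨m, e, hm, hmin⟩
  · exact Or.inl ⟨e, fun i hi => hn i ((hh i).2 hi)⟩
  · exact Or.inr ⟨m, e, (hh m).1 hm, fun i hi => hmin i ((hh i).2 hi)⟩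

theorem pvFirstHit_spec (cs : List Char) (p : Char → Bool) : pvMinSpec (pvHit cs p) (pvFirstHit cs p) := by
  induction cs with
  | nil => exact Or.inl ⟨rfl, by simp [pvHit]⟩
  | cons a tl ih =>
    by_cases hpa : p a = true
    · refine Or.inr ⟨0, by simp [pvFirstHit, hpa], ⟨a, by simp, hpa⟩, fun i _ => Nat.zero_le i⟩
    · rcases ih with ⟨e, hn⟩ | ⟨m, e, hm, hmin⟩
      · refine Or.inl ⟨by simp [pvFirstHit, hpa, e], ?_⟩
        rintro i ⟨b, hb, hpb⟩
        cases i with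
        | zero => simp at hb; subst hb; exact hpa hpb
        | succ j => exact hn j ⟨b, by simpa using hb, hpb⟩
      · refine Or.inr ⟨m + 1, by simp [pvFirstHit, hpa, e], ?_, ?_⟩
        · obtain ⟨b, hb, hpb⟩ := hm; exact ⟨b, by simpa using hb, hpb⟩
        · rintro i ⟨b, hb, hpb⟩
          cases i with
          | zero => simp at hb; subst hb; exact absurd hpb hpa
          | succ j => have := hmin j ⟨b, by simpa using hb, hpb⟩; omega

theorem pvLastHit_spec (cs : List Char) (p : Char → Bool) : pvMaxSpec (pvHit cs p) (pvLastHit cs p) := by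
  induction cs with
  | nil => exact Or.inl ⟨rfl, by simp [pvHit]⟩
  | cons a tl ih =>
    rcases ih with ⟨e, hn⟩ | ⟨m, e, hm, hmax⟩
    · by_cases hpa : p a = true
      · refine Or.inr ⟨0, by simp [pvLastHit, e, hpa], ⟨a, by simp, hpa⟩, ?_⟩
        rintro i ⟨b, hb, hpb⟩
        cases i with
        | zero => exact Nat.le_refl 0
        | succ j => exact absurd ⟨b, by simpa using hb, hpb⟩ (hn j)
      · refine Or.inl ⟨by simp [pvLastHit, e, hpa], ?_⟩
        rintro i ⟨b, hb, hpb⟩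
        cases i with
        | zero => simp at hb; subst hb; exact hpa hpb
        | succ j => exact hn j ⟨b, by simpa using hb, hpb⟩
    · refine Or.inr ⟨m + 1, by simp [pvLastHit, e], ?_, ?_⟩
      · obtain ⟨b, hb, hpb⟩ := hm; exact ⟨b, by simpa using hb, hpb⟩
      · rintro i ⟨b, hb, hpb⟩
        cases i with
        | zero => exact Nat.zero_le _
        | succ j => have := hmax j ⟨b, by simpa using hb, hpb⟩; omega

theorem pvPrefix_single (c : Char) (l : List Char) : ([c].isPrefixOf l = true) ↔ l.head? = some c := by
  cases l with
  | nil => simp [List.isPrefixOf]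
  | cons a tl => simp [List.isPrefixOf]; constructor <;> (intro h; exact h.symm)

theorem pvFind_go_eq (c : Char) (cs : List Char) (k : Nat) :
    PySem.Chars.find.go [c] cs k =
      (if pvFirstHit cs (fun a => a == c) = -1 then -1 else k + pvFirstHit cs (fun a => a == c)) := by
  induction cs generalizing k with
  | nil => simp [PySem.Chars.find.go, pvFirstHit]
  | cons a tl ih =>
    by_cases hac : (a == c) = true
    · have : ([c].isPrefixOf (a :: tl)) = true := by
        rw [pvPrefix_single]; simp at hac; simp [hac]
      simp [PySem.Chars.find.go, this, pvFirstHit, hac]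
    · have hpre : ([c].isPrefixOf (a :: tl)) = false := by
        rw [Bool.eq_false_iff]
        intro h; rw [pvPrefix_single] at h; simp at h; simp [h] at hac
      rw [show PySem.Chars.find.go [c] (a :: tl) k
            = if [c].isPrefixOf (a :: tl) = true then (k : Int) else PySem.Chars.find.go [c] tl (k+1) from rfl]
      rw [hpre]
      simp only [Bool.false_eq_true, if_false, ih]
      by_cases h1 : pvFirstHit tl (fun a => a == c) = -1
      · simp [pvFirstHit, hac, h1]
      · have := pvFirstHit_spec tl (fun a => a == c)
        rcases this with ⟨e,_⟩ | ⟨m,e,_,_⟩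
        · omega
        · simp [pvFirstHit, hac, h1]; omega

theorem pvFind_single (c : Char) (cs : List Char) :
    PySem.Chars.find cs [c] = pvFirstHit cs (fun a => a == c) := by
  rw [show PySem.Chars.find cs [c] = PySem.Chars.find.go [c] cs 0 from rfl, pvFind_go_eq]
  by_cases h : pvFirstHit cs (fun a => a == c) = -1 <;> simp [h]

theorem pvRfind_go_spec (c : Char) (cs : List Char) (j : Nat) :
    pvMaxSpec (fun i => i ≤ j ∧ cs[i]? = some c) (PySem.Chars.rfind.go cs [c] j) := by
  induction j with
  | zero =>
    rw [show PySem.Chars.rfind.go cs [c] 0 = if [c].isPrefixOf cs = true then (0:Int) else -1 from rfl]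
    by_cases h : [c].isPrefixOf cs = true
    · rw [if_pos h]
      rw [pvPrefix_single, List.head?_eq_getElem?] at h
      exact Or.inr ⟨0, by simp, ⟨Nat.le_refl 0, h⟩, fun i hi => by omega⟩
    · rw [if_neg h]
      rw [pvPrefix_single, List.head?_eq_getElem?] at h
      refine Or.inl ⟨rfl, ?_⟩
      rintro i ⟨hi, hget⟩
      interval_cases i
      exact h hget
  | succ j ih =>
    rw [show PySem.Chars.rfind.go cs [c] (j+1)
          = if [c].isPrefixOf (cs.drop (j+1)) = true then ((j:Int)+1) else PySem.Chars.rfind.go cs [c] j from rfl]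
    by_cases h : [c].isPrefixOf (cs.drop (j+1)) = true
    · rw [if_pos h]
      rw [pvPrefix_single, List.head?_drop] at h
      refine Or.inr ⟨j+1, by push_cast; ring, ⟨Nat.le_refl _, h⟩, ?_⟩
      rintro i ⟨hi, _⟩; omega
    · rw [if_neg h]
      rw [pvPrefix_single, List.head?_drop] at h
      refine pvMaxSpec_congr ?_ ih
      intro i
      constructor
      · rintro ⟨h1, h2⟩; exact ⟨by omega, h2⟩
      · rintro ⟨h1, h2⟩
        refine ⟨?_, h2⟩
        by_contra hc
        have hij : i = j+1 := by omega
        rw [hij] at h2; exact h h2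

theorem pvRfind_single (c : Char) (cs : List Char) :
    pvMaxSpec (fun i => cs[i]? = some c) (PySem.Chars.rfind cs [c]) := by
  rw [show PySem.Chars.rfind cs [c] = PySem.Chars.rfind.go cs [c] cs.length from rfl]
  refine pvMaxSpec_congr ?_ (pvRfind_go_spec c cs cs.length)
  intro i
  constructor
  · rintro ⟨_, h2⟩; exact h2
  · intro h2
    refine ⟨?_, h2⟩
    by_contra hc
    simp [List.getElem?_eq_none (by omega : cs.length ≤ i)] at h2

theorem pvMaxSpec_max {h1 h2 : Nat → Prop} {r1 r2 : Int}
    (s1 : pvMaxSpec h1 r1) (s2 : pvMaxSpec h2 r2) :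
    pvMaxSpec (fun i => h1 i ∨ h2 i) (max r1 r2) := by
  rcases s1 with ⟨e1, n1⟩ | ⟨m1, e1, hm1, x1⟩ <;> rcases s2 with ⟨e2, n2⟩ | ⟨m2, e2, hm2, x2⟩
  · exact Or.inl ⟨by omega, fun i hi => hi.elim (n1 i) (n2 i)⟩
  · refine Or.inr ⟨m2, by omega, Or.inr hm2, ?_⟩
    rintro i (hi | hi)
    · exact absurd hi (n1 i)
    · exact x2 i hi
  · refine Or.inr ⟨m1, by omega, Or.inl hm1, ?_⟩
    rintro i (hi | hi)
    · exact x1 i hi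
    · exact absurd hi (n2 i)
  · refine Or.inr ⟨max m1 m2, by omega, ?_, ?_⟩
    · rcases Nat.le_total m1 m2 with hle | hle
      · rw [Nat.max_eq_right hle]; exact Or.inr hm2
      · rw [Nat.max_eq_left hle]; exact Or.inl hm1
    · rintro i (hi | hi)
      · exact le_trans (x1 i hi) (Nat.le_max_left _ _)
      · exact le_trans (x2 i hi) (Nat.le_max_right _ _)

def pvCmin (r s : Int) : Int := if r = -1 then s else if s = -1 then r else min r s

theorem pvMinSpec_cmin {h1 h2 : Nat → Prop} {r1 r2 : Int}
    (s1 : pvMinSpec h1 r1) (s2 : pvMinSpec h2 r2) :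
    pvMinSpec (fun i => h1 i ∨ h2 i) (pvCmin r1 r2) := by
  rcases s1 with ⟨e1, n1⟩ | ⟨m1, e1, hm1, x1⟩ <;> rcases s2 with ⟨e2, n2⟩ | ⟨m2, e2, hm2, x2⟩
  · exact Or.inl ⟨by simp [pvCmin, e1, e2], fun i hi => hi.elim (n1 i) (n2 i)⟩
  · refine Or.inr ⟨m2, by simp [pvCmin, e1, e2], Or.inr hm2, ?_⟩
    rintro i (hi | hi)
    · exact absurd hi (n1 i)
    · exact x2 i hi
  · refine Or.inr ⟨m1, by simp [pvCmin, e1]; omega, Or.inl hm1, ?_⟩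
    rintro i (hi | hi)
    · exact x1 i hi
    · exact absurd hi (n2 i)
  · refine Or.inr ⟨min m1 m2, by simp [pvCmin, e1, e2], ?_, ?_⟩
    · rcases Nat.le_total m1 m2 with hle | hle
      · rw [Nat.min_eq_left hle]; exact Or.inl hm1
      · rw [Nat.min_eq_right hle]; exact Or.inr hm2
    · rintro i (hi | hi)
      · exact le_trans (Nat.min_le_left _ _) (x1 i hi)
      · exact le_trans (Nat.min_le_right _ _) (x2 i hi)

theorem pvRfindFrom_clamped (cs sub : List Char) (b : Int) (h0 : 0 ≤ b) (h1 : b ≤ cs.length) :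
    PySem.Chars.rfindFrom cs sub 0 (some b) = PySem.Chars.rfind (cs.take b.toNat) sub := by
  simp only [PySem.Chars.rfindFrom]
  split_ifs <;> first | rfl | omega | simp_all

theorem pvFindFrom_clamped (cs sub : List Char) (b : Int) (h0 : 0 ≤ b) (h1 : b ≤ cs.length) :
    PySem.Chars.findFrom cs sub b none =
      (if PySem.Chars.find (cs.drop b.toNat) sub = -1 then -1 else b + PySem.Chars.find (cs.drop b.toNat) sub) := by
  simp only [PySem.Chars.findFrom]
  split_ifs <;> first | rfl | omega | simp_all

-- position table: indices (offset k) of characters satisfying p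
def pvIdxs (p : Char → Bool) (cs : List Char) (k : Int) : List Int :=
  (PySem.List.enumerate cs k).filterMap (fun ic => if p ic.2 then some ic.1 else none)

theorem pvIdxs_nil (p : Char → Bool) (k : Int) : pvIdxs p [] k = [] := by
  simp [pvIdxs, PySem.List.enumerate]

theorem pvIdxs_cons (p : Char → Bool) (a : Char) (tl : List Char) (k : Int) :
    pvIdxs p (a :: tl) k = (if p a = true then [k] else []) ++ pvIdxs p tl (k+1) := by
  have he : PySem.List.enumerate (a::tl) k = (k,a) :: PySem.List.enumerate tl (k+1) := by
    simp [PySem.List.enumerate]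
  rw [pvIdxs, he, List.filterMap_cons]
  by_cases h : p a = true
  · simp only [h, if_true]; rfl
  · simp only [h, if_false, Bool.false_eq_true]
    simp [pvIdxs]

theorem pvIdxs_ge (p : Char → Bool) (cs : List Char) (k : Int) : ∀ i ∈ pvIdxs p cs k, k ≤ i := by
  induction cs generalizing k with
  | nil => simp [pvIdxs_nil]
  | cons a tl ih =>
    intro i hi
    rw [pvIdxs_cons] at hi
    rcases List.mem_append.1 hi with h | h
    · by_cases hp : p a = true
      · simp [hp] at h; omega
      · simp [hp] at h
    · have := ih (k+1) i h; omega

theorem pvIdxs_head? (p : Char → Bool) (cs : List Char) (k : Int) :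
    (pvIdxs p cs k).head? =
      (if pvFirstHit cs p = -1 then none else some (k + pvFirstHit cs p)) := by
  induction cs generalizing k with
  | nil => simp [pvIdxs_nil, pvFirstHit]
  | cons a tl ih =>
    rw [pvIdxs_cons]
    by_cases hp : p a = true
    · simp [hp, pvFirstHit]
    · rw [if_neg hp, List.nil_append, ih (k+1)]
      by_cases h1 : pvFirstHit tl p = -1
      · simp [pvFirstHit, hp, h1]
      · have := pvFirstHit_spec tl p
        rcases this with ⟨e,_⟩ | ⟨m,e,_,_⟩
        · omega
        · simp [pvFirstHit, hp, h1]
          omega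

theorem pvLefts_getLast? (p : Char → Bool) (cs : List Char) (k : Int) (m : Nat) :
    ((pvIdxs p cs k).filter (fun i => decide (i < k + m))).getLast? =
      (if pvLastHit (cs.take m) p = -1 then none
       else some (k + pvLastHit (cs.take m) p)) := by
  induction cs generalizing k m with
  | nil => simp [pvIdxs_nil, pvLastHit]
  | cons a tl ih =>
    cases m with
    | zero =>
      have hnil : (pvIdxs p (a :: tl) k).filter (fun i => decide (i < k + ((0:Nat) : Int))) = [] := by
        rw [List.filter_eq_nil_iff]
        intro x hx
        have hge := pvIdxs_ge p (a :: tl) k x hx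
        simp
        omega
      rw [hnil]
      simp [pvLastHit]
    | succ m =>
      rw [pvIdxs_cons, List.filter_append, List.getLast?_append]
      have hfilter2 : (pvIdxs p tl (k+1)).filter (fun i => decide (i < k + ((m+1 : Nat) : Int)))
          = (pvIdxs p tl (k+1)).filter (fun i => decide (i < (k+1) + (m : Int))) := by
        apply List.filter_congr
        intro x _
        simp; omega
      rw [hfilter2, ih (k+1) m]
      by_cases h1 : pvLastHit (tl.take m) p = -1
      · simp only [h1, if_true, Option.none_or]
        by_cases hp : p a = true
        · have : (if p a = true then [k] else []).filter (fun i => decide (i < k + ((m+1: Nat) : Int))) = [k] := by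
            simp [hp]
          rw [this]
          simp [pvLastHit, List.take_succ_cons, h1, hp]
        · have : (if p a = true then [k] else []).filter (fun i => decide (i < k + ((m+1: Nat) : Int))) = [] := by
            simp [hp]
          rw [this]
          simp [pvLastHit, List.take_succ_cons, h1, hp]
      · have hs := pvLastHit_spec (tl.take m) p
        rcases hs with ⟨e,_⟩ | ⟨mm,e,_,_⟩
        · omega
        · simp only [h1, if_false, Option.some_or]
          have h2 : pvLastHit ((a :: tl).take (m+1)) p = pvLastHit (tl.take m) p + 1 := by
            simp [List.take_succ_cons, pvLastHit, h1]
          rw [h2]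
          rw [if_neg (by omega)]
          congr 1
          omega

theorem pvRights_head? (p : Char → Bool) (cs : List Char) (k : Int) (m : Nat) :
    ((pvIdxs p cs k).filter (fun i => decide (k + m ≤ i))).head? =
      (if pvFirstHit (cs.drop m) p = -1 then none
       else some (k + m + pvFirstHit (cs.drop m) p)) := by
  induction cs generalizing k m with
  | nil => simp [pvIdxs_nil, pvFirstHit]
  | cons a tl ih =>
    cases m with
    | zero =>
      have hself : (pvIdxs p (a :: tl) k).filter (fun i => decide (k + ((0:Nat) : Int) ≤ i)) = pvIdxs p (a :: tl) k := by
        rw [List.filter_eq_self]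
        intro x hx
        have hge := pvIdxs_ge p (a :: tl) k x hx
        simp
        omega
      rw [hself, pvIdxs_head?]
      simp
    | succ m =>
      rw [pvIdxs_cons, List.filter_append]
      have hhd : (if p a = true then [k] else []).filter (fun i => decide (k + ((m+1 : Nat) : Int) ≤ i)) = [] := by
        by_cases hp : p a = true <;> simp [hp]
      rw [hhd, List.nil_append]
      have hfilter2 : (pvIdxs p tl (k+1)).filter (fun i => decide (k + ((m+1 : Nat) : Int) ≤ i))
          = (pvIdxs p tl (k+1)).filter (fun i => decide ((k+1) + (m : Int) ≤ i)) := by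
        apply List.filter_congr
        intro x _
        simp
        omega
      rw [hfilter2, ih (k+1) m]
      simp only [List.drop_succ_cons]
      by_cases h1 : pvFirstHit (tl.drop m) p = -1
      · simp [h1]
      · rw [if_neg h1, if_neg h1]
        congr 1
        push_cast
        ring

def pvSh (b r : Int) : Int := if r = -1 then -1 else b + r

theorem pvFirstHit_ge (cs : List Char) (p : Char → Bool) : -1 ≤ pvFirstHit cs p := by
  rcases pvFirstHit_spec cs p with ⟨e,_⟩ | ⟨m,e,_,_⟩ <;> omega

theorem pvMin3_ne (b f1 f2 f3 : Int) (hb : 0 ≤ b) (h1 : -1 ≤ f1) (h2 : -1 ≤ f2) (h3 : -1 ≤ f3) :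
    (([pvSh b f1, pvSh b f2, pvSh b f3].filter (fun idx => decide (idx ≠ -1))) ≠ []) ↔
      pvCmin f1 (pvCmin f2 f3) ≠ -1 := by
  by_cases e1 : f1 = -1 <;> by_cases e2 : f2 = -1 <;> by_cases e3 : f3 = -1 <;>
    simp [pvSh, pvCmin, e1, e2, e3] <;> (try split_ifs) <;> (try simp_all) <;> omega

theorem pvMin3_val (b f1 f2 f3 : Int) (hb : 0 ≤ b) (h1 : -1 ≤ f1) (h2 : -1 ≤ f2) (h3 : -1 ≤ f3) :
    (PySem.List.min? (([pvSh b f1, pvSh b f2, pvSh b f3].filter (fun idx => decide (idx ≠ -1)))) (fun y => y)).getD 0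
      = if pvCmin f1 (pvCmin f2 f3) = -1 then 0 else b + pvCmin f1 (pvCmin f2 f3) := by
  by_cases e1 : f1 = -1 <;> by_cases e2 : f2 = -1 <;> by_cases e3 : f3 = -1 <;>
  · try have hx1 : ¬ (b + f1 = -1) := by omega
    try have hx2 : ¬ (b + f2 = -1) := by omega
    try have hx3 : ¬ (b + f3 = -1) := by omega
    simp_all [pvSh, pvCmin]
    try rw [PySem.List.min?_id_cons]
    try simp [List.foldl]
    try split_ifs
    all_goals try omega
    all_goals simp [PySem.List.min?]

-- the accumulator updates of B's fused loop, as list operations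
def pvUpLast (o : Option Int) (l : List Int) : Option Int := (l.getLast?.map (· + 1)).or o
def pvUpFirst (o : Option Int) (l : List Int) : Option Int := o.or (l.head?.map (· + 1))

theorem pvUpLast_cons (o : Option Int) (k : Int) (l : List Int) :
    pvUpLast o (k :: l) = pvUpLast (some (k+1)) l := by
  rcases l with _ | ⟨b, l⟩
  · simp [pvUpLast]
  · cases h : (b :: l).getLast? with
    | none => simp at h
    | some v => simp [pvUpLast, List.getLast?_cons_cons, h]

theorem pvP_not_nl {a : Char} (h : pvP a = true) : pvNl a = false := by
  by_cases hd : a = '\n'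
  · subst hd; exact absurd h (by decide)
  · simp [pvNl, hd]

theorem pvFold (ls le : Int) (cs : List Char) (k : Int) (st : PvSt) :
    (PySem.List.enumerate cs k).foldl (pvStep ls le) st =
      ⟨pvUpLast st.sb ((pvIdxs pvP cs k).filter (fun i => decide (i < ls))),
       pvUpFirst st.se ((pvIdxs pvP cs k).filter (fun i => decide (le ≤ i))),
       pvUpLast st.lb ((pvIdxs pvNl cs k).filter (fun i => decide (i < ls))),
       pvUpFirst st.ln ((pvIdxs pvNl cs k).filter (fun i => decide (le ≤ i)))⟩ := by
  induction cs generalizing k st with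
  | nil =>
    cases st
    simp [PySem.List.enumerate, pvIdxs_nil, pvUpLast, pvUpFirst]
  | cons a tl ih =>
    have he : PySem.List.enumerate (a::tl) k = (k,a) :: PySem.List.enumerate tl (k+1) := by
      simp [PySem.List.enumerate]
    rw [he, List.foldl_cons, ih]
    simp only [pvIdxs_cons, List.filter_append]
    by_cases hpa : pvP a = true
    · have hpnl : pvNl a = false := pvP_not_nl hpa
      rw [show pvStep ls le st (k, a) =
        { st with
          sb := if k < ls then some (k + 1) else st.sb,
          se := if le ≤ k ∧ st.se = none then some (k + 1) else st.se } by
          simp [pvStep, hpa]]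
      by_cases hkl : k < ls <;> by_cases hlk : le ≤ k <;>
        rcases hse : st.se with _ | v <;>
        simp [hpa, hpnl, hkl, hlk, pvUpLast_cons, pvUpFirst, Option.or]
    · by_cases hnl : a = '\n'
      · have hpnl : pvNl a = true := by simp [pvNl, hnl]
        rw [show pvStep ls le st (k, a) =
          { st with
            lb := if k < ls then some (k + 1) else st.lb,
            ln := if le ≤ k ∧ st.ln = none then some (k + 1) else st.ln } by
            simp [pvStep, hnl, pvP]]
        by_cases hkl : k < ls <;> by_cases hlk : le ≤ k <;>
          rcases hln : st.ln with _ | v <;>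
          simp [hpa, hpnl, hkl, hlk, pvUpLast_cons, pvUpFirst, Option.or]
      · have hpnl : pvNl a = false := by simp [pvNl, hnl]
        rw [show pvStep ls le st (k, a) = st by simp [pvStep, hpa, hnl]]
        simp [hpa, hpnl]

theorem pvSh_neg1 (b : Int) {r : Int} (h : r = -1) : pvSh b r = -1 := by simp [pvSh, h]

theorem pvSh_of_ne (b : Int) {r : Int} (h : ¬ r = -1) : pvSh b r = b + r := by simp [pvSh, h]

theorem pvFb_nn (t : String) (n : Int) : pvFb t n none none = PySem.Str.strip (PySem.Str.slice t (some 0) (some n)) := rfl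

theorem pvFb_ns (t : String) (n v : Int) : pvFb t n none (some v) = PySem.Str.strip (PySem.Str.slice t (some 0) (some (v - 1))) := rfl

theorem pvFb_sn (t : String) (n u : Int) : pvFb t n (some u) none = PySem.Str.strip (PySem.Str.slice t (some u) (some n)) := rfl

theorem pvFb_ss (t : String) (n u v : Int) : pvFb t n (some u) (some v) = PySem.Str.strip (PySem.Str.slice t (some u) (some (v - 1))) := rfl

theorem pvWrap_some_some (t : String) (n b e : Int) (lb ln : Option Int) :
    pvWrap t n (some b) (some e) lb ln = PySem.Str.strip (PySem.Str.slice t (some b) (some e)) := rfl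

theorem pvWrap_some_none (t : String) (n b : Int) (lb ln : Option Int) :
    pvWrap t n (some b) none lb ln = pvFb t n lb ln := rfl

theorem pvWrap_none_left (t : String) (n : Int) (se lb ln : Option Int) :
    pvWrap t n none se lb ln = pvFb t n lb ln := by cases se <;> rfl

theorem pv_main (t : String) (a b : Int) :
    extract_section_sentence_py t a b = extract_section_sentence_py_alt t a b := by
  by_cases ht : t = ""
  · simp [extract_section_sentence_py, extract_section_sentence_py_alt, ht]
  · unfold extract_section_sentence_py extract_section_sentence_py_alt
    rw [if_neg ht, if_neg ht]
    have hlen : PySem.Str.len t = ((t.toList.length : Nat) : Int) := by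
      simp [PySem.Str.len_eq]
    simp only [hlen]
    generalize hls : max (0:Int) (min a ((t.toList.length : Nat) : Int)) = ls
    generalize hle : max (0:Int) (min b ((t.toList.length : Nat) : Int)) = le
    have hls0 : 0 ≤ ls := by omega
    have hlsL : ls ≤ (t.toList.length : Int) := by omega
    have hle0 : 0 ≤ le := by omega
    have hleL : le ≤ (t.toList.length : Int) := by omega
    set cs : List Char := t.toList with hcs
    set ts : List Char := cs.take ls.toNat with hts
    set ds : List Char := cs.drop le.toNat with hds
    have hdot : (".".toList) = ['.'] := rfl
    have hbang : ("!".toList) = ['!'] := rfl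
    have hq : ("?".toList) = ['?'] := rfl
    have hnlL : ("\n".toList) = ['\n'] := rfl
    have hrfF : ∀ c : Char, PySem.Chars.rfindFrom cs [c] 0 (some ls) = PySem.Chars.rfind ts [c] := by
      intro c; rw [pvRfindFrom_clamped cs [c] ls hls0 (by omega)]
    have hleft : max (max (PySem.Str.rfindFrom t "." 0 (some ls)) (PySem.Str.rfindFrom t "!" 0 (some ls)))
          (PySem.Str.rfindFrom t "?" 0 (some ls)) = pvLastHit ts pvP := by
      rw [PySem.Str.rfindFrom_eq, PySem.Str.rfindFrom_eq, PySem.Str.rfindFrom_eq, hdot, hbang, hq]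
      rw [← hcs, hrfF, hrfF, hrfF]
      refine pvMaxSpec_unique ?_ (pvLastHit_spec ts pvP)
      refine pvMaxSpec_congr ?_ (pvMaxSpec_max (pvMaxSpec_max (pvRfind_single '.' ts) (pvRfind_single '!' ts)) (pvRfind_single '?' ts))
      intro i
      constructor
      · rintro ((h | h) | h) <;> exact ⟨_, h, by simp [pvP]⟩
      · rintro ⟨x, hx, hpx⟩
        simp [pvP] at hpx
        rcases hpx with (h | h) | h <;> subst h
        · exact Or.inl (Or.inl hx)
        · exact Or.inl (Or.inr hx)
        · exact Or.inr hx
    have hlineL : PySem.Str.rfindFrom t "\n" 0 (some ls) = pvLastHit ts pvNl := by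
      rw [PySem.Str.rfindFrom_eq, hnlL, ← hcs, hrfF]
      refine pvMaxSpec_unique ?_ (pvLastHit_spec ts pvNl)
      refine pvMaxSpec_congr ?_ (pvRfind_single '\n' ts)
      intro i
      constructor
      · intro h; exact ⟨_, h, by simp [pvNl]⟩
      · rintro ⟨x, hx, hpx⟩
        simp [pvNl] at hpx; subst hpx; exact hx
    have hfin : ∀ c : Char, PySem.Chars.findFrom cs [c] le none = pvSh le (pvFirstHit ds (fun x => x == c)) := by
      intro c
      rw [pvFindFrom_clamped cs [c] le hle0 (by omega), pvFind_single]
      rfl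
    have hlineR : PySem.Str.findFrom t "\n" le none = pvSh le (pvFirstHit ds pvNl) := by
      rw [PySem.Str.findFrom_eq, hnlL, ← hcs, hfin]
      rfl
    set f1 := pvFirstHit ds (fun x => x == '.') with hf1
    set f2 := pvFirstHit ds (fun x => x == '!') with hf2
    set f3 := pvFirstHit ds (fun x => x == '?') with hf3
    set F := pvCmin f1 (pvCmin f2 f3) with hF
    have hFfh : F = pvFirstHit ds pvP := by
      refine pvMinSpec_unique ?_ (pvFirstHit_spec ds pvP)
      refine pvMinSpec_congr ?_ (pvMinSpec_cmin (pvFirstHit_spec ds _) (pvMinSpec_cmin (pvFirstHit_spec ds _) (pvFirstHit_spec ds _)))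
      intro i
      constructor
      · rintro (h | h | h) <;> obtain ⟨x, hx, hpx⟩ := h <;> simp at hpx <;> subst hpx <;> exact ⟨_, hx, by simp [pvP]⟩
      · rintro ⟨x, hx, hpx⟩
        simp [pvP] at hpx
        rcases hpx with (h | h) | h <;> subst h
        · exact Or.inl ⟨_, hx, by simp⟩
        · exact Or.inr (Or.inl ⟨_, hx, by simp⟩)
        · exact Or.inr (Or.inr ⟨_, hx, by simp⟩)
    have hcands : [PySem.Str.findFrom t "." le none, PySem.Str.findFrom t "!" le none, PySem.Str.findFrom t "?" le none]
        = [pvSh le f1, pvSh le f2, pvSh le f3] := by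
      rw [PySem.Str.findFrom_eq, PySem.Str.findFrom_eq, PySem.Str.findFrom_eq, hdot, hbang, hq, ← hcs, hfin, hfin, hfin]
    -- the fused loop's final state
    rw [pvFold ls le cs 0 ⟨none, none, none, none⟩]
    have hlefts : ∀ p : Char → Bool, (pvIdxs p cs 0).filter (fun i => decide (i < ls)) =
        (pvIdxs p cs 0).filter (fun i => decide (i < 0 + ((ls.toNat : Nat) : Int))) := by
      intro p; apply List.filter_congr; intro x _; simp; omega
    have hrights : ∀ p : Char → Bool, (pvIdxs p cs 0).filter (fun i => decide (le ≤ i)) =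
        (pvIdxs p cs 0).filter (fun i => decide (0 + ((le.toNat : Nat) : Int) ≤ i)) := by
      intro p; apply List.filter_congr; intro x _; simp; omega
    have hsb : pvUpLast none ((pvIdxs pvP cs 0).filter (fun i => decide (i < ls))) =
        (if pvLastHit ts pvP = -1 then none else some (pvLastHit ts pvP + 1)) := by
      rw [pvUpLast, hlefts, pvLefts_getLast?, ← hts]
      by_cases h : pvLastHit ts pvP = -1 <;> simp [h]
    have hse : pvUpFirst none ((pvIdxs pvP cs 0).filter (fun i => decide (le ≤ i))) =
        (if pvFirstHit ds pvP = -1 then none else some (le + pvFirstHit ds pvP + 1)) := by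
      rw [pvUpFirst, hrights, pvRights_head?, ← hds]
      by_cases h : pvFirstHit ds pvP = -1 <;> simp [h, Option.or] <;> try omega
    have hlb : pvUpLast none ((pvIdxs pvNl cs 0).filter (fun i => decide (i < ls))) =
        (if pvLastHit ts pvNl = -1 then none else some (pvLastHit ts pvNl + 1)) := by
      rw [pvUpLast, hlefts, pvLefts_getLast?, ← hts]
      by_cases h : pvLastHit ts pvNl = -1 <;> simp [h]
    have hln : pvUpFirst none ((pvIdxs pvNl cs 0).filter (fun i => decide (le ≤ i))) =
        (if pvFirstHit ds pvNl = -1 then none else some (le + pvFirstHit ds pvNl + 1)) := by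
      rw [pvUpFirst, hrights, pvRights_head?, ← hds]
      by_cases h : pvFirstHit ds pvNl = -1 <;> simp [h, Option.or] <;> try omega
    simp only [hleft, hcands, hlineL, hlineR, hsb, hse, hlb, hln]
    have hf1g : -1 ≤ f1 := pvFirstHit_ge _ _
    have hf2g : -1 ≤ f2 := pvFirstHit_ge _ _
    have hf3g : -1 ≤ f3 := pvFirstHit_ge _ _
    have hNFg : -1 ≤ pvFirstHit ds pvNl := pvFirstHit_ge _ _
    have hFH_iff := pvMin3_ne le f1 f2 f3 hle0 hf1g hf2g hf3g
    have hfbA : pvFb t ((cs.length : Nat) : Int)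
        (if pvLastHit ts pvNl = -1 then none else some (pvLastHit ts pvNl + 1))
        (if pvFirstHit ds pvNl = -1 then none else some (le + pvFirstHit ds pvNl + 1)) =
        PySem.Str.strip (PySem.Str.slice t
          (some (if pvLastHit ts pvNl = -1 then 0 else pvLastHit ts pvNl + 1))
          (some (if pvSh le (pvFirstHit ds pvNl) = -1 then ((cs.length : Nat) : Int)
                 else pvSh le (pvFirstHit ds pvNl)))) := by
      have he1 : le + pvFirstHit ds pvNl + 1 - 1 = le + pvFirstHit ds pvNl := by omega
      by_cases hNLc : pvLastHit ts pvNl = -1 <;> by_cases hNFc : pvFirstHit ds pvNl = -1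
      · rw [if_pos hNLc, if_pos hNFc, pvFb_nn, if_pos hNLc, pvSh_neg1 le hNFc,
            if_pos (show (-1 : Int) = -1 from rfl)]
      · rw [if_pos hNLc, if_neg hNFc, pvFb_ns, if_pos hNLc, pvSh_of_ne le hNFc,
            if_neg (show ¬(le + pvFirstHit ds pvNl = -1) by omega), he1]
      · rw [if_neg hNLc, if_pos hNFc, pvFb_sn, if_neg hNLc, pvSh_neg1 le hNFc,
            if_pos (show (-1 : Int) = -1 from rfl)]
      · rw [if_neg hNLc, if_neg hNFc, pvFb_ss, if_neg hNLc, pvSh_of_ne le hNFc,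
            if_neg (show ¬(le + pvFirstHit ds pvNl = -1) by omega), he1]
    by_cases hLH : pvLastHit ts pvP = -1 <;> by_cases hFH : pvFirstHit ds pvP = -1
    · rw [if_neg (by simp [hLH]), if_pos hLH, if_pos hFH, pvWrap_none_left, hfbA]
    · rw [if_neg (by simp [hLH]), if_pos hLH, if_neg hFH, pvWrap_none_left, hfbA]
    · rw [if_neg (by
        rintro ⟨-, hne⟩
        rw [hFH_iff, ← hF, hFfh] at hne
        exact hne hFH)]
      rw [if_neg hLH, if_pos hFH, pvWrap_some_none, hfbA]
    · rw [if_pos ⟨hLH, by rw [hFH_iff, ← hF, hFfh]; exact hFH⟩]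
      rw [if_neg hLH, if_neg hFH, pvWrap_some_some]
      rw [pvMin3_val le f1 f2 f3 hle0 hf1g hf2g hf3g, ← hF, hFfh, if_neg hFH]

-- ===== VERDICT (by name: the statement is the Claim_ definition above) =====
theorem extract_section_sentence_py_spec : Claim_equal_extract_section_sentence_py := by
  intro section_text local_start local_end _
  unfold Spec_extract_section_sentence_py
  exact pv_main section_text local_start local_end
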